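-- pv_equiv track=rewrite | github.com/zekrowm/transit_planning_with_python | scripts/operations_tools/runtime_pivot_clever.py | sort_route_segments
-- ===== SOURCE A (Python) =====
-- from typing import List, Mapping, Optional, Sequence, Union, Iterable, Tuple, Dict, Set
--
-- def _norm(s: str) -> str:
--     """Normalize a stop name: trim and collapse internal whitespace."""
--     return " ".join((s or "").strip().split())
--
-- def sort_route_segments(segments: Iterable[str]) -> List[str]:
--     """Return original segment labels in travel order when a unique chain exists.
--
--     Uses normalized nodes internally to infer order, but returns the exact original
--     SegmentName labels for compatibility with pivot-table columns. If the segments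
--     do not form a single simple path (e.g., branching, loops, ambiguity), the
--     original order is returned unchanged.
--     """
--     original: List[str] = list(segments)
--     if not original:
--         return original
--
--     # Build mapping from normalized edge -> original label
--     norm_edges: List[Tuple[str, str]] = []
--     label_for_edge: Dict[Tuple[str, str], str] = {}
--     for seg in original:
--         if " - " not in seg:
--             continue
--         a_raw, b_raw = seg.split(" - ", 1)
--         a, b = _norm(a_raw), _norm(b_raw)
--         e = (a, b)
--         # Keep first-seen label for this normalized edge
--         if e not in label_for_edge:
--             label_for_edge[e] = seg
--             norm_edges.append(e)
--
--     if not norm_edges: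
--         return original
--
--     # Build successor map and degree counts; reject branching immediately.
--     succ: Dict[str, str] = {}
--     indeg: Dict[str, int] = {}
--     outdeg: Dict[str, int] = {}
--     nodes: Set[str] = set()
--
--     for a, b in norm_edges:
--         nodes.update([a, b])
--         if a in succ and succ[a] != b:
--             # Branching (multiple distinct successors) -> ambiguous
--             return original
--         succ[a] = b
--         outdeg[a] = outdeg.get(a, 0) + 1
--         indeg[b] = indeg.get(b, 0) + 1
--         indeg.setdefault(a, 0)
--         outdeg.setdefault(b, 0)
--
--     # Candidate starts: prefer outdeg - indeg == 1, else nodes with indeg == 0, else all nodes.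
--     starts: List[str] = (
--         [n for n in nodes if outdeg.get(n, 0) - indeg.get(n, 0) == 1]
--         or [n for n in nodes if indeg.get(n, 0) == 0]
--         or list(nodes)
--     )
--
--     def walk(start: str) -> List[str]:
--         """Return ordered original labels if a full simple path exists from start."""
--         used: Set[Tuple[str, str]] = set()
--         order: List[str] = []
--         cur: str = start
--         steps: int = 0
--         while cur in succ:
--             nxt: str = succ[cur]
--             e: Tuple[str, str] = (cur, nxt)
--             if e in used:
--                 # Loop detected
--                 return []
--             used.add(e)
--             order.append(label_for_edge[e])
--             cur = nxt
--             steps += 1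
--             if steps > len(norm_edges):
--                 # Safety break for unexpected cycles
--                 return []
--         # Accept only if every edge was used exactly once
--         return order if len(used) == len(norm_edges) else []
--
--     # Try each candidate start; accept a unique full-coverage solution.
--     solutions: List[List[str]] = []
--     for s in starts:
--         sol = walk(s)
--         if sol:
--             solutions.append(sol)
--
--     if not solutions:
--         return original
--     if any(solutions[0] != s for s in solutions[1:]):
--         # Multiple distinct valid chains -> ambiguous
--         return original
--     return solutions[0]
-- ===== SOURCE B (Python) =====
-- from typing import Iterable, List
--
--
-- def _norm(s: str) -> str:
--     """Normalize a stop name: trim and collapse internal whitespace."""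
--     return " ".join((s or "").strip().split())
--
--
-- def sort_route_segments(segments: Iterable[str]) -> List[str]:
--     """Degree-based single-walk reordering: find the unique chain start from
--     out-minus-in degree counts and do one deterministic walk, instead of
--     walking from every candidate start and comparing the solutions."""
--     original = list(segments)
--     if not original:
--         return original
--
--     # Same normalized-edge extraction as the original (first-seen label wins).
--     label_for_edge = {}
--     norm_edges = []
--     for seg in original:
--         if " - " not in seg:
--             continue
--         a_raw, b_raw = seg.split(" - ", 1)
--         e = (_norm(a_raw), _norm(b_raw))
--         if e not in label_for_edge:
--             label_for_edge[e] = seg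
--             norm_edges.append(e)
--     if not norm_edges:
--         return original
--
--     # One pass: successor map plus out-minus-in degree balance per node.
--     succ = {}
--     diff = {}
--     for a, b in norm_edges:
--         if a in succ:
--             # duplicates were removed, so this is a second distinct successor
--             return original
--         succ[a] = b
--         diff[a] = diff.get(a, 0) + 1
--         diff[b] = diff.get(b, 0) - 1
--
--     # A single simple chain has exactly one node with balance +1: its start.
--     starts = [n for n in diff if diff[n] == 1]
--     if len(starts) != 1:
--         return original
--
--     # One bounded walk from that start.
--     cur = starts[0]
--     order = []
--     for _ in range(len(norm_edges)):
--         if cur not in succ: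
--             break
--         nxt = succ[cur]
--         order.append(label_for_edge[(cur, nxt)])
--         cur = nxt
--     if cur in succ or len(order) != len(norm_edges):
--         # cycle, or edges not all covered by the walk
--         return original
--     return order
-- ===== Notes on version B (the rewrite author's own statement) =====
-- stated objective: alternative
-- what changed: Instead of walking from every candidate start node and comparing all resulting chains, B computes the out-minus-in degree balance per node in one pass, requires a unique node with balance +1 (the only possible chain start), and performs a single bounded walk from it.
import Mathlib
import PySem

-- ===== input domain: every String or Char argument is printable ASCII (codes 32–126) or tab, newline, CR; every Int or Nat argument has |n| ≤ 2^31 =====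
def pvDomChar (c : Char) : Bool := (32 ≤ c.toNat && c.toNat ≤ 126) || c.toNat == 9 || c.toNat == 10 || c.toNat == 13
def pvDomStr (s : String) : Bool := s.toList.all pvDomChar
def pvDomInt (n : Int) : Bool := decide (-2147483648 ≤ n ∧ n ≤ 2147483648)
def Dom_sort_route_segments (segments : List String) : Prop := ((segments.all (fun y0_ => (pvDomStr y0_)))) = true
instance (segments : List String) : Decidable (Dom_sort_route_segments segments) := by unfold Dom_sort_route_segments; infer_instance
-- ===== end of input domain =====

-- B replaces A's walk-from-every-candidate-start search by one degree-balance pass and a single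
-- bounded walk from the unique balance-+1 node (objective: alternative).

-- ===== PORT A =====
-- shared with port B: both Pythons normalize stop names and extract the deduplicated
-- normalized-edge list with first-seen labels by the identical loop.
def pvNorm (s : String) : String :=
  PySem.Str.join " " (PySem.Str.split₀ (PySem.Str.strip s))

def pvParseStep (st : PySem.Dict (String × String) String × List (String × String)) (seg : String) :
    PySem.Dict (String × String) String × List (String × String) :=
  if PySem.Str.isIn " - " seg then
    match PySem.Str.splitMax? seg " - " 1 with
    | some (a_raw :: b_raw :: _) =>
      let e := (pvNorm a_raw, pvNorm b_raw)
      if st.1.contains e then st else (st.1.insert e seg, st.2 ++ [e])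
    | _ => st  -- unreachable: " - " in seg guarantees a 2-element split
  else st

def pvParse (original : List String) : PySem.Dict (String × String) String × List (String × String) :=
  original.foldl pvParseStep (PySem.Dict.empty, [])

-- A's build loop over norm_edges: succ / indeg / outdeg / nodes, `none` = early `return original`.
def pvStepA
    (st? : Option (PySem.Dict String String × PySem.Dict String Int × PySem.Dict String Int × PySem.Set String))
    (e : String × String) :
    Option (PySem.Dict String String × PySem.Dict String Int × PySem.Dict String Int × PySem.Set String) :=
  match st? with
  | none => none
  | some (succ, indeg, outdeg, nodes) =>
    let nodes' := PySem.Set.update nodes [e.1, e.2]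
    if (match succ.get? e.1 with | some b' => b' != e.2 | none => false) then none
    else some (succ.insert e.1 e.2,
               (indeg.insert e.2 (indeg.getD e.2 0 + 1)).setdefault e.1 0,
               (outdeg.insert e.1 (outdeg.getD e.1 0 + 1)).setdefault e.2 0,
               nodes')

def pvBuildA (edges : List (String × String)) :
    Option (PySem.Dict String String × PySem.Dict String Int × PySem.Dict String Int × PySem.Set String) :=
  edges.foldl pvStepA (some (PySem.Dict.empty, PySem.Dict.empty, PySem.Dict.empty, PySem.Set.ofList []))

-- A's `walk(start)` while-loop; fuel n+2 covers the at most n+1 iterations the steps-guard allows.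
def pvWalkAGo (succ : PySem.Dict String String) (label : PySem.Dict (String × String) String) (n : Nat) :
    Nat → PySem.Set (String × String) → List String → String → Nat → List String
  | 0, _, _, _, _ => []
  | fuel+1, used, order, cur, steps =>
    match succ.get? cur with
    | none => if PySem.Set.len used = (n : Int) then order else []
    | some nxt =>
      if (cur, nxt) ∈ used then []
      else
        let used' := PySem.Set.add used (cur, nxt)
        let order' := order ++ [label.getD (cur, nxt) ""]
        if n < steps + 1 then [] else pvWalkAGo succ label n fuel used' order' nxt (steps + 1)

def pvWalkA (succ : PySem.Dict String String) (label : PySem.Dict (String × String) String)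
    (n : Nat) (start : String) : List String :=
  pvWalkAGo succ label n (n + 2) (PySem.Set.ofList []) [] start 0

def sort_route_segments (segments : List String) : List String :=
  let original := segments
  if original = [] then original
  else
    let parsed := pvParse original
    let label := parsed.1
    let norm_edges := parsed.2
    if norm_edges = [] then original
    else
      match pvBuildA norm_edges with
      | none => original
      | some (succ, indeg, outdeg, nodes) =>
        let n := norm_edges.length
        -- Python iterates the set `nodes`; the result below does not depend on that order,
        -- so the port iterates it in insertion order.
        let s1 := nodes.filter (fun x => decide (outdeg.getD x 0 - indeg.getD x 0 = 1))
        let s2 := nodes.filter (fun x => decide (indeg.getD x 0 = 0))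
        let starts := if s1 ≠ [] then s1 else if s2 ≠ [] then s2 else nodes
        let solutions := starts.foldl (fun acc s =>
          let sol := pvWalkA succ label n s
          if sol ≠ [] then acc ++ [sol] else acc) []
        match solutions with
        | [] => original
        | sol0 :: rest => if rest.any (fun s => s ≠ sol0) then original else sol0

-- ===== PORT B =====
-- B's one-pass build: successor map plus out-minus-in balance, `none` = early `return original`.
def pvStepB (st? : Option (PySem.Dict String String × PySem.Dict String Int)) (e : String × String) :
    Option (PySem.Dict String String × PySem.Dict String Int) :=
  match st? with
  | none => none
  | some (succ, diff) =>
    if succ.contains e.1 then none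
    else
      let diff1 := diff.insert e.1 (diff.getD e.1 0 + 1)
      let diff2 := diff1.insert e.2 (diff1.getD e.2 0 - 1)
      some (succ.insert e.1 e.2, diff2)

def pvBuildB (edges : List (String × String)) :
    Option (PySem.Dict String String × PySem.Dict String Int) :=
  edges.foldl pvStepB (some (PySem.Dict.empty, PySem.Dict.empty))

-- B's single bounded walk (`for _ in range(n)` with break): emitted labels and final node.
def pvWalkB (succ : PySem.Dict String String) (label : PySem.Dict (String × String) String) :
    Nat → String → List String → List String × String
  | 0, cur, order => (order, cur)
  | k+1, cur, order =>
    match succ.get? cur with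
    | none => (order, cur)
    | some nxt => pvWalkB succ label k nxt (order ++ [label.getD (cur, nxt) ""])

def sort_route_segments_alt (segments : List String) : List String :=
  let original := segments
  if original = [] then original
  else
    let parsed := pvParse original
    let label := parsed.1
    let norm_edges := parsed.2
    if norm_edges = [] then original
    else
      match pvBuildB norm_edges with
      | none => original
      | some (succ, diff) =>
        let starts := diff.keys.filter (fun x => decide (diff.getD x 0 = 1))
        match starts with
        | [s] =>
          let r := pvWalkB succ label norm_edges.length s []
          if succ.contains r.2 || decide (r.1.length ≠ norm_edges.length) then original else r.1
        | _ => original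

-- ===== PRECONDITION & SPEC =====
def Spec_sort_route_segments (segments : List String) (out : List String) : Prop := out = sort_route_segments_alt segments
instance (segments : List String) (out : List String) : Decidable (Spec_sort_route_segments segments out) := by unfold Spec_sort_route_segments; infer_instance

-- ===== CLAIM (what is proved, stated in full; the proofs are below) =====
def Claim_equal_sort_route_segments : Prop := ∀ (segments : List String), Dom_sort_route_segments segments → Spec_sort_route_segments segments (sort_route_segments segments)

-- ===== LEMMAS AND PROOFS =====

lemma pvParseStep_inv (st : PySem.Dict (String × String) String × List (String × String))
    (h1 : st.2 = st.1.keys) (h2 : st.1.keys.Nodup) (seg : String) :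
    (pvParseStep st seg).2 = (pvParseStep st seg).1.keys ∧ (pvParseStep st seg).1.keys.Nodup := by
  unfold pvParseStep
  split
  · split
    · next a_raw b_raw tl =>
      dsimp only
      split
      · exact ⟨h1, h2⟩
      · next hc =>
        refine ⟨?_, PySem.Dict.nodup_keys_insert _ _ _ h2⟩
        rw [PySem.Dict.keys_insert_of_not_contains _ _ (by simpa using hc)]
        simp [h1]
    · exact ⟨h1, h2⟩
  · exact ⟨h1, h2⟩
lemma pv_parse_inv (l : List String) :
    ∀ (st : PySem.Dict (String × String) String × List (String × String)),
    st.2 = st.1.keys → st.1.keys.Nodup →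
    (l.foldl pvParseStep st).2 = (l.foldl pvParseStep st).1.keys ∧ (l.foldl pvParseStep st).1.keys.Nodup := by
  induction l with
  | nil => intro st h1 h2; exact ⟨h1, h2⟩
  | cons seg rest ih =>
    intro st h1 h2
    simp only [List.foldl_cons]
    have h := pvParseStep_inv st h1 h2 seg
    exact ih _ h.1 h.2

lemma pv_parse_spec (l : List String) :
    (pvParse l).2 = (pvParse l).1.keys ∧ (pvParse l).1.keys.Nodup := by
  unfold pvParse
  exact pv_parse_inv l (PySem.Dict.empty, []) (by simp [PySem.Dict.keys_empty]) PySem.Dict.nodup_keys_empty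

lemma pv_foldA_none (es : List (String × String)) : es.foldl pvStepA none = none := by
  induction es with
  | nil => rfl
  | cons e es ih => simpa [pvStepA] using ih

lemma pv_foldB_none (es : List (String × String)) : es.foldl pvStepB none = none := by
  induction es with
  | nil => rfl
  | cons e es ih => simpa [pvStepB] using ih

lemma pv_getD_setdefault_zero (d : PySem.Dict String Int) (k x : String) :
    (d.setdefault k 0).getD x 0 = d.getD x 0 := by
  by_cases hx : x = k
  · subst hx; exact PySem.Dict.getD_setdefault_self d x 0 0
  · rw [PySem.Dict.getD_eq_get?_getD, PySem.Dict.get?_setdefault_of_ne d 0 hx,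
        ← PySem.Dict.getD_eq_get?_getD]

set_option maxHeartbeats 1000000 in
lemma pv_build_rel (es : List (String × String)) :
    ∀ (succ : PySem.Dict String String) (ind outd : PySem.Dict String Int)
      (nodes : PySem.Set String) (diff : PySem.Dict String Int),
    es.Nodup →
    (∀ p ∈ succ.items, p ∉ es) →
    succ.keys.Nodup → diff.keys.Nodup → nodes.Nodup →
    (∀ x, outd.getD x 0 - ind.getD x 0 = diff.getD x 0) →
    (∀ x, x ∈ nodes ↔ x ∈ diff.keys) →
    (es.foldl pvStepA (some (succ, ind, outd, nodes)) = none ∧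
       es.foldl pvStepB (some (succ, diff)) = none) ∨
    (∃ succ' ind' outd' nodes' diff',
       es.foldl pvStepA (some (succ, ind, outd, nodes)) = some (succ', ind', outd', nodes') ∧
       es.foldl pvStepB (some (succ, diff)) = some (succ', diff') ∧
       succ'.keys.Nodup ∧ diff'.keys.Nodup ∧ nodes'.Nodup ∧
       (∀ x, outd'.getD x 0 - ind'.getD x 0 = diff'.getD x 0) ∧
       (∀ x, x ∈ nodes' ↔ x ∈ diff'.keys) ∧
       (∀ x, x ∈ diff'.keys ↔ x ∈ diff.keys ∨ x ∈ es.map Prod.fst ∨ x ∈ es.map Prod.snd) ∧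
       (∀ p, p ∈ succ'.items ↔ p ∈ succ.items ∨ p ∈ es) ∧
       (∀ x, diff'.getD x 0 = diff.getD x 0 + ((es.countP (fun p => decide (x = p.1))) : Int)
               - ((es.countP (fun p => decide (x = p.2))) : Int))) := by
  induction es with
  | nil =>
    intro succ ind outd nodes diff _ _ hks hkd hnn hdeg hmem
    right
    exact ⟨succ, ind, outd, nodes, diff, rfl, rfl, hks, hkd, hnn, hdeg, hmem,
      by simp, by simp, by simp⟩
  | cons e es ih =>
    intro succ ind outd nodes diff hnd hfresh hks hkd hnn hdeg hmem
    rcases hg : succ.get? e.1 with _ | b'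
    · -- key fresh: both builds proceed
      have hcont : succ.contains e.1 = false := by
        rw [PySem.Dict.contains_eq_isSome_get?, hg]; rfl
      have hstepA : pvStepA (some (succ, ind, outd, nodes)) e =
          some (succ.insert e.1 e.2,
                (ind.insert e.2 (ind.getD e.2 0 + 1)).setdefault e.1 0,
                (outd.insert e.1 (outd.getD e.1 0 + 1)).setdefault e.2 0,
                PySem.Set.update nodes [e.1, e.2]) := by
        simp [pvStepA, hg]
      have hstepB : pvStepB (some (succ, diff)) e =
          some (succ.insert e.1 e.2,
                (diff.insert e.1 (diff.getD e.1 0 + 1)).insert e.2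
                  ((diff.insert e.1 (diff.getD e.1 0 + 1)).getD e.2 0 - 1)) := by
        simp [pvStepB, hcont]
      have hitems : (succ.insert e.1 e.2).items = succ.items ++ [e] := by
        simpa using PySem.Dict.items_insert_of_not_contains succ e.2 hcont
      have hd1 : ∀ y, (diff.insert e.1 (diff.getD e.1 0 + 1)).getD y 0 =
          if y = e.1 then diff.getD e.1 0 + 1 else diff.getD y 0 :=
        fun y => PySem.Dict.getD_insert diff e.1 y _ _
      have hd2 : ∀ y, ((diff.insert e.1 (diff.getD e.1 0 + 1)).insert e.2
            ((diff.insert e.1 (diff.getD e.1 0 + 1)).getD e.2 0 - 1)).getD y 0 =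
          if y = e.2 then (if e.2 = e.1 then diff.getD e.1 0 + 1 else diff.getD e.2 0) - 1
          else if y = e.1 then diff.getD e.1 0 + 1 else diff.getD y 0 := by
        intro y
        rw [PySem.Dict.getD_insert, hd1 y, hd1 e.2]
      have hind : ∀ y, ((ind.insert e.2 (ind.getD e.2 0 + 1)).setdefault e.1 0).getD y 0 =
          if y = e.2 then ind.getD e.2 0 + 1 else ind.getD y 0 := by
        intro y
        rw [pv_getD_setdefault_zero, PySem.Dict.getD_insert]
      have houtd : ∀ y, ((outd.insert e.1 (outd.getD e.1 0 + 1)).setdefault e.2 0).getD y 0 =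
          if y = e.1 then outd.getD e.1 0 + 1 else outd.getD y 0 := by
        intro y
        rw [pv_getD_setdefault_zero, PySem.Dict.getD_insert]
      have hne : e ∉ es := by
        intro hmem'; exact (List.nodup_cons.mp hnd).1 hmem'
      rcases ih (succ.insert e.1 e.2)
          ((ind.insert e.2 (ind.getD e.2 0 + 1)).setdefault e.1 0)
          ((outd.insert e.1 (outd.getD e.1 0 + 1)).setdefault e.2 0)
          (PySem.Set.update nodes [e.1, e.2])
          ((diff.insert e.1 (diff.getD e.1 0 + 1)).insert e.2
            ((diff.insert e.1 (diff.getD e.1 0 + 1)).getD e.2 0 - 1))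
          (List.nodup_cons.mp hnd).2
          (by
            intro p hp hpes
            rw [hitems] at hp
            rcases List.mem_append.mp hp with hp | hp
            · exact hfresh p hp (List.mem_cons_of_mem _ hpes)
            · simp only [List.mem_singleton] at hp
              subst hp
              exact hne hpes)
          (PySem.Dict.nodup_keys_insert _ _ _ hks)
          (PySem.Dict.nodup_keys_insert _ _ _ (PySem.Dict.nodup_keys_insert _ _ _ hkd))
          (PySem.Set.nodup_update nodes [e.1, e.2] hnn)
          (by
            intro x
            have h1 := hdeg x
            have h2 := hdeg e.1
            have h3 := hdeg e.2
            rw [hind x, houtd x, hd2 x]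
            clear ih hfresh hmem hnd hks hkd hnn hg hdeg
            rcases e with ⟨ea, eb⟩
            dsimp only at *
            split_ifs <;> first | (subst_vars; omega) | simp_all)
          (by
            intro x
            rw [PySem.Set.mem_update]
            simp only [PySem.Dict.mem_keys_insert, List.mem_cons, List.not_mem_nil, or_false]
            rw [hmem x]
            tauto) with h | h
      · left
        simpa [List.foldl_cons, hstepA, hstepB] using h
      · right
        obtain ⟨succ', ind', outd', nodes', diff', hA, hB, c1, c2, c3, c4, c5, c6, c7, c8⟩ := h
        refine ⟨succ', ind', outd', nodes', diff', ?_, ?_, c1, c2, c3, c4, c5, ?_, ?_, ?_⟩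
        · simpa [List.foldl_cons, hstepA] using hA
        · simpa [List.foldl_cons, hstepB] using hB
        · intro x
          rw [c6 x]
          simp only [PySem.Dict.mem_keys_insert, List.map_cons, List.mem_cons]
          tauto
        · intro p
          rw [c7 p, hitems]
          simp only [List.mem_append, List.mem_cons]
          tauto
        · intro x
          rw [c8 x, hd2 x]
          simp only [List.countP_cons, decide_eq_true_eq]
          clear ih hfresh hmem hnd hks hkd hnn hg hdeg c4 c5 c6 c7 c8 c1 c2 c3 hA hB hstepA hstepB hitems hd1 hd2 hind houtd hne
          rcases e with ⟨ea, eb⟩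
          dsimp only at *
          split_ifs <;> first | (subst_vars; push_cast; omega) | simp_all
    · -- existing key: the new edge is a second distinct successor; both builds abort
      have hb : b' ≠ e.2 := by
        intro hbe
        subst hbe
        exact hfresh e (by simpa using PySem.Dict.mem_items_of_get?_eq_some _ hg) List.mem_cons_self
      have hcont : succ.contains e.1 = true := by
        rw [PySem.Dict.contains_eq_isSome_get?, hg]; rfl
      have hstepA : pvStepA (some (succ, ind, outd, nodes)) e = none := by
        simp [pvStepA, hg, hb]
      have hstepB : pvStepB (some (succ, diff)) e = none := by
        simp [pvStepB, hcont]
      left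
      constructor
      · rw [List.foldl_cons, hstepA]; exact pv_foldA_none es
      · rw [List.foldl_cons, hstepB]; exact pv_foldB_none es

def pvG (succ : PySem.Dict String String) (x : String) : String := (succ.get? x).getD x

lemma pvG_some {succ : PySem.Dict String String} {a b : String}
    (h : succ.get? a = some b) : pvG succ a = b := by
  simp [pvG, h]

lemma pv_v_shift {succ : PySem.Dict String String} {cur nxt : String}
    (h : succ.get? cur = some nxt) (i : Nat) :
    (pvG succ)^[i] nxt = (pvG succ)^[i + 1] cur := by
  rw [Function.iterate_succ_apply, pvG_some h]

lemma pv_v_inj (succ : PySem.Dict String String) (s : String) (m : Nat)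
    (hm : ∀ i < m, (succ.get? ((pvG succ)^[i] s)).isSome)
    (hend : succ.get? ((pvG succ)^[m] s) = none) :
    ∀ i j, i ≤ m → j ≤ m → (pvG succ)^[i] s = (pvG succ)^[j] s → i = j := by
  have key : ∀ i j, i < j → j ≤ m → (pvG succ)^[i] s = (pvG succ)^[j] s → False := by
    intro i j hij hj heq
    have hshift : (pvG succ)^[(m - j) + i] s = (pvG succ)^[(m - j) + j] s := by
      rw [Function.iterate_add_apply, Function.iterate_add_apply, heq]
    have hmj : (m - j) + j = m := by omega
    rw [hmj] at hshift
    have hlt : (m - j) + i < m := by omega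
    have := hm _ hlt
    rw [hshift, hend] at this
    simp at this
  intro i j hi hj heq
  rcases Nat.lt_trichotomy i j with h | h | h
  · exact absurd (key i j h hj heq) (by simp)
  · exact h
  · exact absurd (key j i h hi heq.symm) (by simp)

lemma pv_walkB_spec (succ : PySem.Dict String String) (label : PySem.Dict (String × String) String) :
    ∀ (k : Nat) (cur : String) (order : List String),
    ∃ m, m ≤ k ∧ (∀ i < m, (succ.get? ((pvG succ)^[i] cur)).isSome) ∧
      (m < k → succ.get? ((pvG succ)^[m] cur) = none) ∧
      pvWalkB succ label k cur order =
        (order ++ (List.range m).map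
            (fun i => label.getD ((pvG succ)^[i] cur, (pvG succ)^[i + 1] cur) ""),
         (pvG succ)^[m] cur) := by
  intro k
  induction k with
  | zero =>
    intro cur order
    exact ⟨0, le_refl 0, by omega, by omega, by simp [pvWalkB]⟩
  | succ k ih =>
    intro cur order
    rcases hg : succ.get? cur with _ | nxt
    · refine ⟨0, Nat.zero_le _, by omega, fun _ => by simpa using hg, ?_⟩
      simp [pvWalkB, hg]
    · obtain ⟨m, hmk, hsome, hnone, hres⟩ := ih nxt (order ++ [label.getD (cur, nxt) ""])
      refine ⟨m + 1, by omega, ?_, ?_, ?_⟩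
      · intro i hi
        cases i with
        | zero => simp [hg]
        | succ i => rw [← pv_v_shift hg]; exact hsome i (by omega)
      · intro h
        rw [← pv_v_shift hg]
        exact hnone (by omega)
      · have hmap : (List.range (m + 1)).map
              (fun i => label.getD ((pvG succ)^[i] cur, (pvG succ)^[i + 1] cur) "")
            = label.getD (cur, nxt) "" ::
              (List.range m).map
                (fun i => label.getD ((pvG succ)^[i] nxt, (pvG succ)^[i + 1] nxt) "") := by
          rw [List.range_succ_eq_map, List.map_cons, List.map_map]
          congr 1
          · rw [show ((pvG succ)^[0] cur, (pvG succ)^[0 + 1] cur) = (cur, nxt) by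
              rw [← pv_v_shift hg 0, Function.iterate_zero_apply]; simp]
          · apply List.map_congr_left
            intro i _
            simp only [Function.comp_apply, Nat.succ_eq_add_one]
            rw [← pv_v_shift hg i, ← pv_v_shift hg (i + 1)]
        rw [show pvWalkB succ label (k + 1) cur order
              = pvWalkB succ label k nxt (order ++ [label.getD (cur, nxt) ""]) by
            simp [pvWalkB, hg]]
        rw [hres, ← pv_v_shift hg, hmap]
        simp

lemma pv_walkA_step (succ : PySem.Dict String String) (label : PySem.Dict (String × String) String)
    (n : Nat) (s : String) (m : Nat) (hmn : m ≤ n)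
    (hinj : ∀ i j, i < j → j < m → (pvG succ)^[i] s ≠ (pvG succ)^[j] s)
    (i : Nat) (hi : i < m)
    (hg : succ.get? ((pvG succ)^[i] s) = some ((pvG succ)^[i + 1] s)) :
    pvWalkAGo succ label n (n + 2 - i)
      ((List.range i).map (fun t => ((pvG succ)^[t] s, (pvG succ)^[t + 1] s)))
      ((List.range i).map (fun t => label.getD ((pvG succ)^[t] s, (pvG succ)^[t + 1] s) ""))
      ((pvG succ)^[i] s) i
    = pvWalkAGo succ label n (n + 2 - (i + 1))
      ((List.range (i + 1)).map (fun t => ((pvG succ)^[t] s, (pvG succ)^[t + 1] s)))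
      ((List.range (i + 1)).map (fun t => label.getD ((pvG succ)^[t] s, (pvG succ)^[t + 1] s) ""))
      ((pvG succ)^[i + 1] s) (i + 1) := by
  have hnotmem : ((pvG succ)^[i] s, (pvG succ)^[i + 1] s) ∉
      (List.range i).map (fun t => ((pvG succ)^[t] s, (pvG succ)^[t + 1] s)) := by
    intro hmem
    obtain ⟨t, ht, heq⟩ := List.mem_map.mp hmem
    have ht' : t < i := List.mem_range.mp ht
    have : (pvG succ)^[t] s = (pvG succ)^[i] s := congrArg Prod.fst heq
    exact hinj t i ht' hi this
  have hadd : PySem.Set.add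
      ((List.range i).map (fun t => ((pvG succ)^[t] s, (pvG succ)^[t + 1] s)))
      ((pvG succ)^[i] s, (pvG succ)^[i + 1] s)
      = (List.range (i + 1)).map (fun t => ((pvG succ)^[t] s, (pvG succ)^[t + 1] s)) := by
    rw [List.range_succ, List.map_append]
    simp only [PySem.Set.add]
    rw [if_neg (by simpa using hnotmem)]
    simp
  rw [show n + 2 - i = (n + 1 - i) + 1 by omega]
  simp only [pvWalkAGo, hg]
  rw [if_neg hnotmem, if_neg (by omega : ¬ n < i + 1)]
  rw [hadd, show n + 1 - i = n + 2 - (i + 1) by omega, List.range_succ, List.map_append]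
  simp

lemma pv_walkA_clean (succ : PySem.Dict String String) (label : PySem.Dict (String × String) String)
    (n : Nat) (s : String) (m : Nat) (hmn : m ≤ n)
    (hsome : ∀ i < m, (succ.get? ((pvG succ)^[i] s)).isSome)
    (hend : succ.get? ((pvG succ)^[m] s) = none) :
    ∀ d i, i + d = m →
    pvWalkAGo succ label n (n + 2 - i)
      ((List.range i).map (fun t => ((pvG succ)^[t] s, (pvG succ)^[t + 1] s)))
      ((List.range i).map (fun t => label.getD ((pvG succ)^[t] s, (pvG succ)^[t + 1] s) ""))
      ((pvG succ)^[i] s) i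
    = (if m = n
        then (List.range m).map (fun t => label.getD ((pvG succ)^[t] s, (pvG succ)^[t + 1] s) "")
        else []) := by
  have hinj0 := pv_v_inj succ s m hsome hend
  have hinj : ∀ i j, i < j → j < m → (pvG succ)^[i] s ≠ (pvG succ)^[j] s := by
    intro i j hij hj heq
    have := hinj0 i j (by omega) (by omega) heq
    omega
  intro d
  induction d with
  | zero =>
    intro i hi
    have him : i = m := by omega
    subst him
    rw [show n + 2 - i = (n + 1 - i) + 1 by omega]
    simp only [pvWalkAGo, hend]
    simp only [PySem.Set.len, List.length_map, List.length_range]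
    by_cases hin : i = n
    · rw [if_pos (by exact_mod_cast congrArg (Nat.cast (R := Int)) hin), if_pos hin]
    · rw [if_neg (by exact_mod_cast fun h => hin (by exact_mod_cast h)), if_neg hin]
  | succ d ihd =>
    intro i hi
    have hg : succ.get? ((pvG succ)^[i] s) = some ((pvG succ)^[i + 1] s) := by
      obtain ⟨b, hb⟩ := Option.isSome_iff_exists.mp (hsome i (by omega))
      rw [hb]
      congr 1
      rw [Function.iterate_succ_apply', pvG_some hb]
    rw [pv_walkA_step succ label n s m hmn hinj i (by omega) hg]
    exact ihd (i + 1) (by omega)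

lemma pv_walkA_hit (succ : PySem.Dict String String) (label : PySem.Dict (String × String) String)
    (n : Nat) (s : String) (m i0 : Nat) (hmn : m ≤ n) (hi0 : i0 < m)
    (hsome : ∀ i ≤ m, (succ.get? ((pvG succ)^[i] s)).isSome)
    (hinj : ∀ i j, i < j → j < m → (pvG succ)^[i] s ≠ (pvG succ)^[j] s)
    (heq : (pvG succ)^[m] s = (pvG succ)^[i0] s) :
    ∀ d i, i + d = m →
    pvWalkAGo succ label n (n + 2 - i)
      ((List.range i).map (fun t => ((pvG succ)^[t] s, (pvG succ)^[t + 1] s)))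
      ((List.range i).map (fun t => label.getD ((pvG succ)^[t] s, (pvG succ)^[t + 1] s) ""))
      ((pvG succ)^[i] s) i
    = [] := by
  have hgat : ∀ i ≤ m, succ.get? ((pvG succ)^[i] s) = some ((pvG succ)^[i + 1] s) := by
    intro i him
    obtain ⟨b, hb⟩ := Option.isSome_iff_exists.mp (hsome i him)
    rw [hb]
    congr 1
    rw [Function.iterate_succ_apply', pvG_some hb]
  intro d
  induction d with
  | zero =>
    intro i hi
    have him : i = m := by omega
    subst him
    rw [show n + 2 - i = (n + 1 - i) + 1 by omega]
    simp only [pvWalkAGo, hgat i (le_refl i)]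
    rw [if_pos ?_]
    · apply List.mem_map.mpr
      refine ⟨i0, List.mem_range.mpr hi0, ?_⟩
      have hsnd : (pvG succ)^[i + 1] s = (pvG succ)^[i0 + 1] s := by
        rw [Function.iterate_succ_apply', Function.iterate_succ_apply', heq]
      rw [heq, hsnd]
  | succ d ihd =>
    intro i hi
    rw [pv_walkA_step succ label n s m hmn hinj i (by omega) (hgat i (by omega))]
    exact ihd (i + 1) (by omega)

lemma pv_exists_repeat (succ : PySem.Dict String String) (s : String) (n : Nat)
    (hklen : succ.keys.length = n)
    (hall : ∀ i ≤ n, (succ.get? ((pvG succ)^[i] s)).isSome) :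
    ∃ m, m ≤ n ∧ (∃ i0 < m, (pvG succ)^[m] s = (pvG succ)^[i0] s) ∧
      (∀ i j, i < j → j < m → (pvG succ)^[i] s ≠ (pvG succ)^[j] s) := by
  have hmemkeys : ∀ i ≤ n, (pvG succ)^[i] s ∈ succ.keys := by
    intro i hi
    have h := hall i hi
    rw [← PySem.Dict.contains_eq_isSome_get?] at h
    exact (PySem.Dict.contains_iff_mem_keys succ _).mp h
  have hrep : ∃ j, j ≤ n ∧ ∃ i < j, (pvG succ)^[i] s = (pvG succ)^[j] s := by
    by_contra hcon
    push Not at hcon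
    have hinj : ∀ x ∈ List.range (n + 1), ∀ y ∈ List.range (n + 1),
        (pvG succ)^[x] s = (pvG succ)^[y] s → x = y := by
      intro x hx y hy hxy
      rw [List.mem_range] at hx hy
      rcases Nat.lt_trichotomy x y with h | h | h
      · exact absurd hxy (hcon y (by omega) x h)
      · exact h
      · exact absurd hxy.symm (hcon x (by omega) y h)
    have hnd : ((List.range (n + 1)).map (fun i => (pvG succ)^[i] s)).Nodup :=
      List.Nodup.map_on hinj (List.nodup_range)
    have hsub : ((List.range (n + 1)).map (fun i => (pvG succ)^[i] s)) ⊆ succ.keys := by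
      intro x hx
      obtain ⟨i, hi, rfl⟩ := List.mem_map.mp hx
      exact hmemkeys i (by have := List.mem_range.mp hi; omega)
    have hle : ((List.range (n + 1)).map (fun i => (pvG succ)^[i] s)).length ≤ succ.keys.length :=
      (List.subperm_of_subset hnd hsub).length_le
    simp [hklen] at hle
  classical
  have hP : ∃ j, ∃ i < j, (pvG succ)^[i] s = (pvG succ)^[j] s := by
    obtain ⟨j, _, h⟩ := hrep
    exact ⟨j, h⟩
  let m := Nat.find hP
  have hm := Nat.find_spec hP
  refine ⟨m, ?_, ?_, ?_⟩
  · obtain ⟨j, hj, h⟩ := hrep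
    exact le_trans (Nat.find_min' hP h) hj
  · obtain ⟨i0, hi0, he⟩ := hm
    exact ⟨i0, hi0, he.symm⟩
  · intro i j hij hj heq
    exact Nat.find_min hP hj ⟨i, hij, heq⟩

lemma pv_countP_range_inj {α : Type} [DecidableEq α] (f : Nat → α) (k : Nat)
    (hinj : ∀ i j, i < k → j < k → f i = f j → i = j) (x : α) :
    (List.range k).countP (fun i => decide (x = f i)) = if ∃ i, i < k ∧ x = f i then 1 else 0 := by
  induction k with
  | zero => simp
  | succ k ih =>
    rw [List.range_succ, List.countP_append]
    rw [ih (fun i j hi hj => hinj i j (by omega) (by omega))]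
    by_cases hxk : x = f k
    · have hnot : ¬ ∃ i, i < k ∧ x = f i := by
        rintro ⟨i, hi, rfl⟩
        have := hinj i k (by omega) (by omega) hxk
        omega
      rw [if_neg hnot, if_pos ⟨k, by omega, hxk⟩]
      simp [hxk]
    · have : (∃ i, i < k + 1 ∧ x = f i) ↔ (∃ i, i < k ∧ x = f i) := by
        constructor
        · rintro ⟨i, hi, rfl⟩
          have hik : i ≠ k := fun h => hxk (by rw [h])
          exact ⟨i, by omega, rfl⟩
        · rintro ⟨i, hi, rfl⟩
          exact ⟨i, by omega, rfl⟩
      simp only [this]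
      simp [hxk]

lemma pv_filter_singleton {α : Type} (l : List α) (p : α → Bool) (a : α)
    (hnd : l.Nodup) (ha : a ∈ l) (hp : ∀ x, p x = true ↔ x = a) :
    l.filter p = [a] := by
  induction l with
  | nil => cases ha
  | cons y l ih =>
    rcases List.mem_cons.mp ha with rfl | ha'
    · rw [List.filter_cons, if_pos ((hp _).mpr rfl)]
      have hnotin : ∀ x ∈ l, ¬ (p x = true) := by
        intro x hx hpx
        have := (hp x).mp hpx
        subst this
        exact (List.nodup_cons.mp hnd).1 hx
      rw [List.filter_eq_nil_iff.mpr hnotin]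
    · have hya : y ≠ a := by
        intro h
        subst h
        exact (List.nodup_cons.mp hnd).1 ha'
      rw [List.filter_cons, if_neg (by simp [hp, hya])]
      exact ih (List.nodup_cons.mp hnd).2 ha'

lemma pv_solutions_eq (succ : PySem.Dict String String) (label : PySem.Dict (String × String) String)
    (n : Nat) (starts : List String) (h : ∀ s, pvWalkA succ label n s = []) (acc : List (List String)) :
    starts.foldl (fun acc s =>
      if pvWalkA succ label n s ≠ [] then acc ++ [pvWalkA succ label n s] else acc) acc = acc := by
  induction starts generalizing acc with
  | nil => rfl
  | cons s starts ih =>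
    rw [List.foldl_cons]
    simpa [h s] using ih acc

lemma pv_gat (succ : PySem.Dict String String) (s : String) {i m : Nat}
    (hsome : ∀ t < m, (succ.get? ((pvG succ)^[t] s)).isSome) (hi : i < m) :
    succ.get? ((pvG succ)^[i] s) = some ((pvG succ)^[i + 1] s) := by
  obtain ⟨b, hb⟩ := Option.isSome_iff_exists.mp (hsome i hi)
  rw [hb]
  congr 1
  rw [Function.iterate_succ_apply', pvG_some hb]

lemma pv_trace_perm (succ : PySem.Dict String String) (edges : List (String × String))
    (s : String) (n : Nat) (_hnd : edges.Nodup) (_hks : succ.keys.Nodup)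
    (hit : ∀ p, p ∈ succ.items ↔ p ∈ edges) (hn : edges.length = n)
    (hsome : ∀ i < n, (succ.get? ((pvG succ)^[i] s)).isSome)
    (hend : succ.get? ((pvG succ)^[n] s) = none) :
    ((List.range n).map (fun i => ((pvG succ)^[i] s, (pvG succ)^[i + 1] s))).Perm edges := by
  have hinj := pv_v_inj succ s n hsome hend
  have hsub : ((List.range n).map (fun i => ((pvG succ)^[i] s, (pvG succ)^[i + 1] s))) ⊆ edges := by
    intro p hp
    obtain ⟨i, hi, rfl⟩ := List.mem_map.mp hp
    have hi' := List.mem_range.mp hi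
    exact (hit _).mp (PySem.Dict.mem_items_of_get?_eq_some _ (pv_gat succ s hsome hi'))
  have htnd : ((List.range n).map (fun i => ((pvG succ)^[i] s, (pvG succ)^[i + 1] s))).Nodup := by
    refine List.Nodup.map_on ?_ List.nodup_range
    intro x hx y hy hxy
    exact hinj x y (by have := List.mem_range.mp hx; omega) (by have := List.mem_range.mp hy; omega)
      (congrArg Prod.fst hxy)
  exact (List.subperm_of_subset htnd hsub).perm_of_length_le (by simp [hn])

lemma pv_keys_len (succ : PySem.Dict String String) (edges : List (String × String))
    (hks : succ.keys.Nodup) (hnd : edges.Nodup)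
    (hit : ∀ p, p ∈ succ.items ↔ p ∈ edges) : succ.keys.length = edges.length := by
  have hitnd : succ.items.Nodup := by
    have : (succ.items.map Prod.fst).Nodup := by
      simpa [PySem.Dict.keys] using hks
    exact this.of_map
  have h1 : succ.items.Subperm edges := List.subperm_of_subset hitnd (fun p hp => (hit p).mp hp)
  have h2 : edges.Subperm succ.items := List.subperm_of_subset hnd (fun p hp => (hit p).mpr hp)
  have hlen : succ.items.length = edges.length := le_antisymm h1.length_le h2.length_le
  simpa [PySem.Dict.keys] using hlen

lemma pv_deg_char (succ : PySem.Dict String String) (edges : List (String × String))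
    (s : String) (n : Nat)
    (hperm : ((List.range n).map (fun i => ((pvG succ)^[i] s, (pvG succ)^[i + 1] s))).Perm edges)
    (hinj : ∀ i j, i ≤ n → j ≤ n → (pvG succ)^[i] s = (pvG succ)^[j] s → i = j)
    (hn1 : 1 ≤ n) (x : String) :
    ((edges.countP (fun p => decide (x = p.1)) : Int)
      - edges.countP (fun p => decide (x = p.2)) = 1) ↔ x = s := by
  have hc1 : edges.countP (fun p => decide (x = p.1))
      = if ∃ i, i < n ∧ x = (pvG succ)^[i] s then 1 else 0 := by
    rw [← hperm.countP_eq, List.countP_map]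
    exact pv_countP_range_inj (fun i => (pvG succ)^[i] s) n
      (fun i j hi hj h => hinj i j (by omega) (by omega) h) x
  have hc2 : edges.countP (fun p => decide (x = p.2))
      = if ∃ i, i < n ∧ x = (pvG succ)^[i + 1] s then 1 else 0 := by
    rw [← hperm.countP_eq, List.countP_map]
    exact pv_countP_range_inj (fun i => (pvG succ)^[i + 1] s) n
      (fun i j hi hj h => by have := hinj (i + 1) (j + 1) (by omega) (by omega) h; omega) x
  rw [hc1, hc2]
  have hs0 : (pvG succ)^[0] s = s := Function.iterate_zero_apply _ _
  by_cases h1 : ∃ i, i < n ∧ x = (pvG succ)^[i] s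
  · by_cases h2 : ∃ i, i < n ∧ x = (pvG succ)^[i + 1] s
    · rw [if_pos h1, if_pos h2]
      constructor
      · intro h; omega
      · intro hx
        exfalso
        obtain ⟨j, hj, hxe⟩ := h2
        subst hx
        have := hinj 0 (j + 1) (by omega) (by omega) (by rw [hs0, ← hxe])
        omega
    · rw [if_pos h1, if_neg h2]
      constructor
      · intro _
        obtain ⟨i, hi, hxe⟩ := h1
        cases i with
        | zero => rw [hxe, hs0]
        | succ i => exact absurd ⟨i, by omega, hxe⟩ h2
      · intro _; omega
  · rw [if_neg h1]
    constructor
    · intro h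
      split_ifs at h <;> omega
    · intro hx
      exact absurd ⟨0, by omega, by rw [hs0, hx]⟩ h1

lemma pv_walkA_empty (succ : PySem.Dict String String) (label : PySem.Dict (String × String) String)
    (n : Nat) (s0 : String) (hklen : succ.keys.length = n)
    (hnotfull : ¬ ((∀ i < n, (succ.get? ((pvG succ)^[i] s0)).isSome = true)
                    ∧ succ.get? ((pvG succ)^[n] s0) = none)) :
    pvWalkA succ label n s0 = [] := by
  classical
  by_cases hstop : ∃ j, succ.get? ((pvG succ)^[j] s0) = none ∧ j ≤ n
  · obtain ⟨j0, hj0none, hj0n⟩ := hstop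
    have hPex : ∃ j, succ.get? ((pvG succ)^[j] s0) = none := ⟨j0, hj0none⟩
    have hmnone := Nat.find_spec hPex
    have hmle : Nat.find hPex ≤ n := le_trans (Nat.find_min' hPex hj0none) hj0n
    have hsome : ∀ i < Nat.find hPex, (succ.get? ((pvG succ)^[i] s0)).isSome := by
      intro i hi
      exact Option.ne_none_iff_isSome.mp (Nat.find_min hPex hi)
    have hmn : Nat.find hPex ≠ n := by
      intro h
      exact hnotfull ⟨by rw [← h]; exact hsome, by rw [← h]; exact hmnone⟩
    have hr := pv_walkA_clean succ label n s0 (Nat.find hPex) hmle hsome hmnone (Nat.find hPex) 0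
      (by omega)
    unfold pvWalkA
    show pvWalkAGo succ label n (n + 2) [] [] s0 0 = []
    simpa [if_neg hmn] using hr
  · have hall : ∀ i ≤ n, (succ.get? ((pvG succ)^[i] s0)).isSome := by
      intro i hi
      by_contra hno
      exact hstop ⟨i, Option.not_isSome_iff_eq_none.mp (by simpa using hno), hi⟩
    obtain ⟨m, hmn, ⟨i0, hi0, heq⟩, hinj⟩ := pv_exists_repeat succ s0 n hklen hall
    have hr := pv_walkA_hit succ label n s0 m i0 hmn hi0
      (fun i hi => hall i (le_trans hi hmn)) hinj heq m 0 (by omega)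
    unfold pvWalkA
    show pvWalkAGo succ label n (n + 2) [] [] s0 0 = []
    simpa using hr

lemma pv_walkA_full (succ : PySem.Dict String String) (label : PySem.Dict (String × String) String)
    (n : Nat) (s0 : String)
    (hsome : ∀ i < n, (succ.get? ((pvG succ)^[i] s0)).isSome)
    (hend : succ.get? ((pvG succ)^[n] s0) = none) :
    pvWalkA succ label n s0
      = (List.range n).map (fun t => label.getD ((pvG succ)^[t] s0, (pvG succ)^[t + 1] s0) "") := by
  have hr := pv_walkA_clean succ label n s0 n (le_refl n) hsome hend n 0 (by omega)
  unfold pvWalkA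
  show pvWalkAGo succ label n (n + 2) [] [] s0 0 = _
  simpa using hr

lemma pv_walkB_full (succ : PySem.Dict String String) (label : PySem.Dict (String × String) String)
    (n : Nat) (s0 : String)
    (hsome : ∀ i < n, (succ.get? ((pvG succ)^[i] s0)).isSome)
    (hend : succ.get? ((pvG succ)^[n] s0) = none) :
    pvWalkB succ label n s0 []
      = ((List.range n).map (fun t => label.getD ((pvG succ)^[t] s0, (pvG succ)^[t + 1] s0) ""),
         (pvG succ)^[n] s0) := by
  obtain ⟨m, hmn, hBsome, hBnone, hres⟩ := pv_walkB_spec succ label n s0 []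
  have hm : m = n := by
    by_contra h
    have hlt : m < n := by omega
    have h1 := hBnone hlt
    have h2 := hsome m hlt
    rw [h1] at h2
    simp at h2
  subst hm
  simpa using hres

set_option maxHeartbeats 1000000 in
theorem pv_main (segments : List String) :
    sort_route_segments segments = sort_route_segments_alt segments := by
  classical
  unfold sort_route_segments sort_route_segments_alt
  by_cases hseg : segments = []
  · simp [hseg]
  simp only [if_neg hseg]
  obtain ⟨hkeyseq, hknd⟩ := pv_parse_spec segments
  by_cases hE : (pvParse segments).2 = []
  · simp [hE]
  simp only [if_neg hE]
  have hnd : (pvParse segments).2.Nodup := by rw [hkeyseq]; exact hknd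
  rcases pv_build_rel (pvParse segments).2 PySem.Dict.empty PySem.Dict.empty PySem.Dict.empty
      (PySem.Set.ofList []) PySem.Dict.empty hnd
      (by intro p hp; rw [show (PySem.Dict.empty : PySem.Dict String String).items = [] from rfl] at hp; cases hp)
      PySem.Dict.nodup_keys_empty PySem.Dict.nodup_keys_empty
      (by rw [show (PySem.Set.ofList [] : PySem.Set String) = [] from rfl]; exact List.nodup_nil)
      (by intro x; simp [PySem.Dict.getD_empty])
      (by intro x; rw [show (PySem.Set.ofList [] : PySem.Set String) = [] from rfl]; simp [PySem.Dict.keys_empty])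
    with ⟨hA, hB⟩ | ⟨succ, ind, outd, nodes, diff, hA, hB, c1, c2, c3, c4, c5, c6, c7, c8⟩
  · rw [show pvBuildA (pvParse segments).2 = none from hA,
        show pvBuildB (pvParse segments).2 = none from hB]
  · rw [show pvBuildA (pvParse segments).2 = some (succ, ind, outd, nodes) from hA,
        show pvBuildB (pvParse segments).2 = some (succ, diff) from hB]
    dsimp only
    have c7' : ∀ p, p ∈ succ.items ↔ p ∈ (pvParse segments).2 := by
      intro p
      rw [c7 p, show (PySem.Dict.empty : PySem.Dict String String).items = [] from rfl]
      simp
    have c6' : ∀ x, x ∈ diff.keys ↔ x ∈ (pvParse segments).2.map Prod.fst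
        ∨ x ∈ (pvParse segments).2.map Prod.snd := by
      intro x
      rw [c6 x, PySem.Dict.keys_empty]
      simp
    have c8' : ∀ x, diff.getD x 0
        = ((pvParse segments).2.countP (fun p => decide (x = p.1)) : Int)
          - ((pvParse segments).2.countP (fun p => decide (x = p.2)) : Int) := by
      intro x
      rw [c8 x, PySem.Dict.getD_empty]
      ring
    have hsit : ∀ a b, succ.get? a = some b ↔ (a, b) ∈ (pvParse segments).2 := by
      intro a b
      constructor
      · intro h
        exact (c7' _).mp (PySem.Dict.mem_items_of_get?_eq_some _ h)
      · intro h
        exact (PySem.Dict.get?_eq_some_iff_mem_items succ a b c1).mpr ((c7' _).mpr h)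
    have hn1 : 0 < (pvParse segments).2.length := List.length_pos_iff.mpr hE
    have hklen : succ.keys.length = (pvParse segments).2.length :=
      pv_keys_len succ (pvParse segments).2 c1 hnd c7'
    by_cases hfull : ∃ s0, (∀ i < (pvParse segments).2.length,
        (succ.get? ((pvG succ)^[i] s0)).isSome = true)
        ∧ succ.get? ((pvG succ)^[(pvParse segments).2.length] s0) = none
    · obtain ⟨s0, hsome, hend⟩ := hfull
      have hperm := pv_trace_perm succ (pvParse segments).2 s0 (pvParse segments).2.length
        hnd c1 c7' rfl hsome hend
      have hinj := pv_v_inj succ s0 (pvParse segments).2.length hsome hend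
      have hdeg1 : ∀ x, (diff.getD x 0 = 1) ↔ x = s0 := by
        intro x
        rw [c8' x]
        exact pv_deg_char succ (pvParse segments).2 s0 (pvParse segments).2.length
          hperm hinj hn1 x
      have hs0mem : s0 ∈ (pvParse segments).2.map Prod.fst := by
        have h0 : succ.get? s0 = some ((pvG succ)^[1] s0) := by
          have := pv_gat succ s0 hsome hn1
          rwa [Function.iterate_zero_apply] at this
        exact List.mem_map.mpr ⟨(s0, (pvG succ)^[1] s0), (hsit _ _).mp h0, rfl⟩
      have hstartsB : diff.keys.filter (fun x => decide (diff.getD x 0 = 1)) = [s0] :=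
        pv_filter_singleton _ _ _ c2 ((c6' s0).mpr (Or.inl hs0mem))
          (by intro x; simp only [decide_eq_true_eq]; exact hdeg1 x)
      have hs1 : nodes.filter (fun x => decide (outd.getD x 0 - ind.getD x 0 = 1)) = [s0] := by
        refine pv_filter_singleton _ _ _ c3 ((c5 s0).mpr ((c6' s0).mpr (Or.inl hs0mem))) ?_
        intro x
        simp only [decide_eq_true_eq]
        rw [c4 x]
        exact hdeg1 x
      have hwa := pv_walkA_full succ (pvParse segments).1 (pvParse segments).2.length s0 hsome hend
      have hwb := pv_walkB_full succ (pvParse segments).1 (pvParse segments).2.length s0 hsome hend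
      have hordlen : ((List.range (pvParse segments).2.length).map
          (fun t => (pvParse segments).1.getD ((pvG succ)^[t] s0, (pvG succ)^[t + 1] s0) "")).length
          = (pvParse segments).2.length := by simp
      have hordne : ((List.range (pvParse segments).2.length).map
          (fun t => (pvParse segments).1.getD ((pvG succ)^[t] s0, (pvG succ)^[t + 1] s0) "")) ≠ [] := by
        intro h
        rw [h] at hordlen
        simp at hordlen
        omega
      rw [hs1, hstartsB, if_pos (show ([s0] : List String) ≠ [] by simp)]
      rw [List.foldl_cons, List.foldl_nil, hwa, if_pos hordne]
      dsimp only
      rw [hwb]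
      have hcontn : succ.contains ((pvG succ)^[(pvParse segments).2.length] s0) = false := by
        rw [PySem.Dict.contains_eq_isSome_get?, hend]
        rfl
      simp [hcontn]
    · have hwalks : ∀ s1, pvWalkA succ (pvParse segments).1 (pvParse segments).2.length s1 = [] := by
        intro s1
        refine pv_walkA_empty succ (pvParse segments).1 (pvParse segments).2.length s1 hklen ?_
        intro hc
        exact hfull ⟨s1, hc⟩
      rw [pv_solutions_eq succ (pvParse segments).1 (pvParse segments).2.length _ hwalks []]
      rcases hSB : diff.keys.filter (fun x => decide (diff.getD x 0 = 1)) with _ | ⟨sB, rest⟩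
      · rfl
      rcases rest with _ | ⟨sB2, rest2⟩
      · obtain ⟨m, hmn, hBsome, hBnone, hres⟩ :=
          pv_walkB_spec succ (pvParse segments).1 (pvParse segments).2.length sB []
        dsimp only
        rw [hres]
        by_cases hmn' : m = (pvParse segments).2.length
        · subst hmn'
          have hcn : succ.get? ((pvG succ)^[(pvParse segments).2.length] sB) ≠ none := by
            intro hnone
            exact hfull ⟨sB, hBsome, hnone⟩
          have hct : succ.contains ((pvG succ)^[(pvParse segments).2.length] sB) = true := by
            rw [PySem.Dict.contains_eq_isSome_get?]
            exact Option.ne_none_iff_isSome.mp hcn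
          simp [hct]
        · simp [hmn']
      · rfl

-- ===== VERDICT (by name: the statement is the Claim_ definition above) =====
theorem sort_route_segments_spec : Claim_equal_sort_route_segments := by
  intro segments _
  exact pv_main segments
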